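-- pv_equiv track=rewrite | github.com/jagilley/kunstwerk | make_video.py | split_text_for_formatting
-- ===== SOURCE A (Python) =====
-- from typing import List, Dict, Optional, Tuple
-- from typing import Dict, List
-- from typing import List
-- from typing import List, Tuple, Optional, Dict
--
-- def split_text_for_formatting(text: str, character_names: List[str]) -> List[Tuple[str, str]]:
--     """Split text into segments with formatting.
--     Returns list of (text, format_type) tuples.
--     format_type can be 'regular', 'italic', or 'bold'"""
--     segments = []
--     current_pos = 0
--
--     # First check if the line starts with a character name
--     for name in character_names:
--         if text.startswith(name + "\n"):
--             name_end = len(name) + 1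
--             segments.append((text[:name_end], 'bold'))
--             current_pos = name_end
--             break
--
--     while True:
--         start = text.find('(', current_pos)
--         if start == -1:
--             if current_pos < len(text):
--                 segments.append((text[current_pos:], 'regular'))
--             break
--
--         if start > current_pos:
--             segments.append((text[current_pos:start], 'regular'))
--
--         end = text.find(')', start)
--         if end == -1:
--             segments.append((text[start:], 'regular'))
--             break
--
--         segments.append((text[start:end+1], 'italic'))
--         current_pos = end + 1
--
--     return segments
-- ===== SOURCE B (Python) =====
-- from typing import List, Tuple
--
-- def split_text_for_formatting(text: str, character_names: List[str]) -> List[Tuple[str, str]]: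
--     """Split text into segments with formatting.
--     Returns list of (text, format_type) tuples.
--     format_type can be 'regular', 'italic', or 'bold'"""
--     segments = []
--     body = text
--     for name in character_names:
--         if text.startswith(name + "\n"):
--             segments.append((text[:len(name) + 1], 'bold'))
--             body = text[len(name) + 1:]
--             break
--
--     buf = []
--     in_paren = False
--     for c in body:
--         if not in_paren:
--             if c == '(':
--                 if buf:
--                     segments.append((''.join(buf), 'regular'))
--                 buf = [c]
--                 in_paren = True
--             else:
--                 buf.append(c)
--         else:
--             buf.append(c)
--             if c == ')':
--                 segments.append((''.join(buf), 'italic'))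
--                 buf = []
--                 in_paren = False
--     if buf:
--         segments.append((''.join(buf), 'regular'))
--     return segments
-- ===== Notes on version B (the rewrite author's own statement) =====
-- stated objective: alternative
-- what changed: Replaced A's repeated text.find('(')/find(')') index-jumping while-loop with a single char-by-char state-machine scan carrying a segment buffer and an in-paren flag.
import Mathlib
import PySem

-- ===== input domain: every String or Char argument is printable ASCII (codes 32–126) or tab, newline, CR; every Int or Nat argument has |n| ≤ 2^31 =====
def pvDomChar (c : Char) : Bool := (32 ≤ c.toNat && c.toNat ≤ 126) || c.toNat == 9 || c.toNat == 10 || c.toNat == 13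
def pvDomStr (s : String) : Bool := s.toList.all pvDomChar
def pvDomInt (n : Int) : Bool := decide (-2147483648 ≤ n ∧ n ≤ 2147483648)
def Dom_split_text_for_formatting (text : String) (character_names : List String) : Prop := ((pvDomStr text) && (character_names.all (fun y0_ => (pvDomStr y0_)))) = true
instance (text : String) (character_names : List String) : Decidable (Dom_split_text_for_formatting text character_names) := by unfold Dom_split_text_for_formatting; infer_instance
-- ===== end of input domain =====

-- B replaces A's find('(')/find(')') index-jumping while-loop by a single char-by-char
-- state-machine scan (buffer + in-paren flag); same cost, different decomposition.


-- ===== PORT A =====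
-- startswith(name + "\n") bounds the prefix length; the port's while-loop carries this bound
lemma pvStartswith_len_le (text name : String)
    (h : PySem.Str.startswith text (name ++ "\n") = true) :
    name.toList.length + 1 ≤ text.toList.length := by
  rw [PySem.Str.startswith_eq] at h
  have hp := (PySem.Chars.startswith_iff _ _).mp h
  have := hp.length_le
  simpa using this

-- the 'while True' loop of A; current_pos is 'pos' (always a Nat in A), carried with its bound
def pvLoopA (text : String) (pos : Nat) (hpos : pos ≤ text.toList.length) :
    List (String × String) :=
  let start := PySem.Str.findFrom text "(" (pos : Int)
  if hs : start = -1 then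
    if (pos : Int) < PySem.Str.len text then
      [(PySem.Str.slice text (some (pos : Int)) none, "regular")]
    else []
  else
    let pre : List (String × String) :=
      if start > (pos : Int) then
        [(PySem.Str.slice text (some (pos : Int)) (some start), "regular")]
      else []
    have hA : start = PySem.Chars.findFrom text.toList "(".toList (pos : Int) none := by
      simp [start, PySem.Str.findFrom_eq]
    have hstart : ((pos : Int) ≤ start ∧ "(".toList <+: text.toList.drop start.toNat ∧
        ∀ i, pos ≤ i → i < start.toNat → ¬ "(".toList <+: text.toList.drop i) := by
      rw [hA]
      exact PySem.Chars.findFrom_natCast_spec text.toList "(".toList pos hpos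
        (by rw [← hA]; exact hs)
    have hjlt : start.toNat < text.toList.length := by
      have hpre := hstart.2.1
      have hne : text.toList.drop start.toNat ≠ [] := by
        intro hnil; rw [hnil] at hpre; simp at hpre
      have := List.length_drop (l := text.toList) (i := start.toNat)
      have hlen : 0 < (text.toList.drop start.toNat).length := List.length_pos_of_ne_nil hne
      omega
    have hposle : (pos : Int) ≤ start := hstart.1
    have hstart0 : (0:Int) ≤ start := le_trans (by positivity) hposle
    let e := PySem.Str.findFrom text ")" start
    if he : e = -1 then
      pre ++ [(PySem.Str.slice text (some start) none, "regular")]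
    else
      have hcast : ((start.toNat : Nat) : Int) = start := Int.toNat_of_nonneg hstart0
      have hB : e = PySem.Chars.findFrom text.toList ")".toList ((start.toNat : Nat) : Int) none := by
        simp [e, PySem.Str.findFrom_eq, hcast]
      have hend : ((start.toNat : Int) ≤ e ∧ ")".toList <+: text.toList.drop e.toNat ∧
          ∀ i, start.toNat ≤ i → i < e.toNat → ¬ ")".toList <+: text.toList.drop i) := by
        rw [hB]
        exact PySem.Chars.findFrom_natCast_spec text.toList ")".toList start.toNat
          (le_of_lt hjlt) (by rw [← hB]; exact he)
      have hklt : e.toNat < text.toList.length := by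
        have hpre := hend.2.1
        have hne : text.toList.drop e.toNat ≠ [] := by
          intro hnil; rw [hnil] at hpre; simp at hpre
        have hlen : 0 < (text.toList.drop e.toNat).length := List.length_pos_of_ne_nil hne
        have := List.length_drop (l := text.toList) (i := e.toNat)
        omega
      have hse : (start.toNat : Int) ≤ e := hend.1
      have hfin : text.toList.length - (e.toNat + 1) < text.toList.length - pos := by omega
      pre ++ ((PySem.Str.slice text (some start) (some (e + 1)), "italic")
        :: pvLoopA text (e.toNat + 1) (by omega))
termination_by text.toList.length - pos
decreasing_by
  exact hfin

def pvNameLoopA (text : String) (names : List String) : List (String × String) :=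
  match names with
  | [] => pvLoopA text 0 (Nat.zero_le _)
  | name :: rest =>
    if h : PySem.Str.startswith text (name ++ "\n") = true then
      (PySem.Str.slice text none (some ((name.toList.length : Int) + 1)), "bold")
        :: pvLoopA text (name.toList.length + 1) (pvStartswith_len_le text name h)
    else pvNameLoopA text rest

def split_text_for_formatting (text : String) (character_names : List String) :
    List (String × String) :=
  pvNameLoopA text character_names

-- ===== PORT B =====
-- char-by-char state machine: segments so far, current buffer, in-paren flag
def pvScanB : List (String × String) → List Char → Bool → List Char → List (String × String)
  | segs, buf, _, [] => if buf.isEmpty then segs else segs ++ [(String.ofList buf, "regular")]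
  | segs, buf, true, c :: rest =>
    if c = ')' then pvScanB (segs ++ [(String.ofList (buf ++ [c]), "italic")]) [] false rest
    else pvScanB segs (buf ++ [c]) true rest
  | segs, buf, false, c :: rest =>
    if c = '(' then
      pvScanB (if buf.isEmpty then segs else segs ++ [(String.ofList buf, "regular")])
        [c] true rest
    else pvScanB segs (buf ++ [c]) false rest

def split_text_for_formatting_alt (text : String) (character_names : List String) :
    List (String × String) :=
  match character_names.find? (fun n => PySem.Str.startswith text (n ++ "\n")) with
  | none => pvScanB [] [] false text.toList
  | some name =>
      pvScanB [(PySem.Str.slice text none (some ((name.toList.length : Int) + 1)), "bold")]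
        [] false
        ((PySem.Str.slice text (some ((name.toList.length : Int) + 1)) none).toList)

-- ===== PRECONDITION & SPEC =====
def Spec_split_text_for_formatting (text : String) (character_names : List String) (out : List (String × String)) : Prop := out = split_text_for_formatting_alt text character_names
instance (text : String) (character_names : List String) (out : List (String × String)) : Decidable (Spec_split_text_for_formatting text character_names out) := by unfold Spec_split_text_for_formatting; infer_instance

-- ===== CLAIM (what is proved, stated in full; the proofs are below) =====
def Claim_equal_split_text_for_formatting : Prop := ∀ (text : String) (character_names : List String), Dom_split_text_for_formatting text character_names → Spec_split_text_for_formatting text character_names (split_text_for_formatting text character_names)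

-- ===== LEMMAS AND PROOFS =====

-- the accumulated segments just prepend to the result
lemma pvScanB_acc (l : List Char) (segs : List (String × String)) (buf : List Char)
    (inP : Bool) : pvScanB segs buf inP l = segs ++ pvScanB [] buf inP l := by
  induction l generalizing segs buf inP with
  | nil => by_cases h : buf.isEmpty <;> simp [pvScanB, h]
  | cons c rest ih =>
    cases inP <;> simp only [pvScanB] <;> split_ifs <;>
      (rw [ih]; try (conv_rhs => rw [ih])) <;>
      try simp only [List.append_assoc, List.singleton_append, List.nil_append]

-- scanning non-'(' chars in regular mode only grows the buffer
lemma pvScanB_reg (pre : List Char) (h : '(' ∉ pre) (buf rest : List Char) :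
    pvScanB [] buf false (pre ++ rest) = pvScanB [] (buf ++ pre) false rest := by
  induction pre generalizing buf with
  | nil => simp
  | cons p pre' ih =>
    have hp : p ≠ '(' := fun he => h (he ▸ List.mem_cons_self)
    simp only [List.cons_append, pvScanB, if_neg hp]
    rw [ih (fun hm => h (List.mem_cons_of_mem _ hm))]
    simp

-- scanning non-')' chars in paren mode only grows the buffer
lemma pvScanB_par (ip : List Char) (h : ')' ∉ ip) (buf rest : List Char) :
    pvScanB [] buf true (ip ++ rest) = pvScanB [] (buf ++ ip) true rest := by
  induction ip generalizing buf with
  | nil => simp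
  | cons p ip' ih =>
    have hp : p ≠ ')' := fun he => h (he ▸ List.mem_cons_self)
    simp only [List.cons_append, pvScanB, if_neg hp]
    rw [ih (fun hm => h (List.mem_cons_of_mem _ hm))]
    simp

-- slices as list operations
lemma pvSliceFrom (s : String) (a : Nat) :
    PySem.Str.slice s (some (a : Int)) none = String.ofList (s.toList.drop a) :=
  String.ext (by simp [PySem.List.slice_from_natCast])

lemma pvSliceBetween (s : String) (a b : Nat) :
    PySem.Str.slice s (some (a : Int)) (some (b : Int))
      = String.ofList ((s.toList.drop a).take (b - a)) :=
  String.ext (by simp [PySem.List.slice_natCast])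

-- a first-occurrence bound keeps the window clean of the char
lemma pvWindow (l : List Char) (c : Char) (a b : Nat)
    (hmin : ∀ i, a ≤ i → i < b → ¬ [c] <+: l.drop i) : c ∉ (l.drop a).take (b - a) := by
  intro hmem
  rw [List.mem_take_iff_getElem] at hmem
  obtain ⟨m, hm, he⟩ := hmem
  have hld := List.length_drop (l := l) (i := a)
  have hmin' : m < min (b - a) (l.drop a).length := hm
  have hlen : a + m < l.length := by omega
  apply hmin (a + m) (by omega) (by omega)
  have hdrop : l[a + m]'hlen :: l.drop (a + m + 1) = l.drop (a + m) :=
    List.getElem_cons_drop hlen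
  have h2 : (l.drop a)[m]'(by omega) = l[a + m]'hlen := List.getElem_drop
  have hc : l[a + m]'hlen = c := by rw [← he, h2]
  rw [← hdrop, hc]
  exact ⟨l.drop (a + m + 1), rfl⟩

-- a prefix match of a single char fixes that position
lemma pvAt (l : List Char) (c : Char) (i : Nat) (hi : i < l.length)
    (h : [c] <+: l.drop i) : l.drop i = c :: l.drop (i + 1) := by
  have hdrop : l[i]'hi :: l.drop (i + 1) = l.drop i := List.getElem_cons_drop hi
  obtain ⟨t, ht⟩ := h
  have h2 : c :: t = l[i]'hi :: l.drop (i + 1) := by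
    rw [← ht] at hdrop; simpa using hdrop.symm
  have h3 : t = l.drop (i + 1) := (List.cons_eq_cons.mp h2).2
  rw [← ht, h3]
  simp

-- the core: A's while-loop from pos equals B's scan of the suffix
lemma pvLoop_eq_scan_aux (text : String) : ∀ (n pos : Nat) (hpos : pos ≤ text.toList.length),
    text.toList.length - pos ≤ n →
    pvLoopA text pos hpos = pvScanB [] [] false (text.toList.drop pos) := by
  intro n
  induction n with
  | zero =>
    intro pos hpos hle
    have hpe : pos = text.toList.length := by omega
    have hdrop : text.toList.drop pos = [] := by simp [hpe]
    have hs : PySem.Str.findFrom text "(" (pos : Int) = -1 := by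
      rw [PySem.Str.findFrom_eq,
        PySem.Chars.findFrom_natCast_eq_neg_one_iff _ _ _ hpos, hdrop]
      simp
    rw [pvLoopA]
    simp only [dif_pos hs]
    rw [if_neg (by simp [hpe]), hdrop]
    simp [pvScanB]
  | succ n ih =>
    intro pos hpos hle
    by_cases hs : PySem.Str.findFrom text "(" (pos : Int) = -1
    · -- no '(' in the rest: one regular segment (if non-empty)
      have hnotin : '(' ∉ text.toList.drop pos := by
        intro hmem
        have hs' : PySem.Chars.findFrom text.toList "(".toList (pos : Int) none = -1 := by
          simpa using hs
        exact (PySem.Chars.findFrom_natCast_eq_neg_one_iff _ _ _ hpos).mp hs'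
          ((List.singleton_infix_iff _ _).mpr hmem)
      conv_rhs => rw [← List.append_nil (text.toList.drop pos)]
      rw [pvScanB_reg _ hnotin]
      rw [pvLoopA]
      simp only [dif_pos hs]
      by_cases hlt : pos < text.toList.length
      · rw [if_pos (by simp only [PySem.Str.len_eq]; exact_mod_cast (String.length_toList ▸ hlt)),
          pvSliceFrom]
        have hne : (text.toList.drop pos).isEmpty = false := by
          rw [List.isEmpty_eq_false_iff]
          intro hnil
          have h0 : (text.toList.drop pos).length = 0 := by rw [hnil]; rfl
          rw [List.length_drop] at h0
          omega
        simp [pvScanB, hne]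
      · rw [if_neg (by simp only [PySem.Str.len_eq]; exact_mod_cast (String.length_toList ▸ hlt))]
        have hnil : text.toList.drop pos = [] := List.drop_eq_nil_of_le (by omega)
        rw [hnil]
        simp [pvScanB]
    · -- a '(' is found at index j
      have hA : PySem.Str.findFrom text "(" (pos : Int)
          = PySem.Chars.findFrom text.toList "(".toList (pos : Int) none := by simp
      have hstart := PySem.Chars.findFrom_natCast_spec text.toList "(".toList pos hpos
        (by rw [← hA]; exact hs)
      have h0 : (0 : Int) ≤ PySem.Chars.findFrom text.toList "(".toList (pos : Int) none :=
        le_trans (by positivity) hstart.1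
      set j := (PySem.Chars.findFrom text.toList "(".toList (pos : Int) none).toNat with hjdef
      have hjc : ((j : Nat) : Int) = PySem.Chars.findFrom text.toList "(".toList (pos : Int) none :=
        Int.toNat_of_nonneg h0
      have hposj : pos ≤ j := by
        have := hstart.1; omega
      have hpre1 : ['('] <+: text.toList.drop j := by
        have := hstart.2.1; exact this
      have hjlt : j < text.toList.length := by
        obtain ⟨t, ht⟩ := hpre1
        have : 0 < (text.toList.drop j).length := by rw [← ht]; simp
        rw [List.length_drop] at this; omega
      have hLj : text.toList.drop j = '(' :: text.toList.drop (j + 1) :=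
        pvAt _ '(' j hjlt hpre1
      have hprenotin : '(' ∉ (text.toList.drop pos).take (j - pos) :=
        pvWindow text.toList '(' pos j hstart.2.2
      have hdecomp : text.toList.drop pos
          = (text.toList.drop pos).take (j - pos) ++ '(' :: text.toList.drop (j + 1) := by
        conv_lhs => rw [← List.take_append_drop (j - pos) (text.toList.drop pos)]
        rw [List.drop_drop, show pos + (j - pos) = j from by omega, hLj]
      have hfind : PySem.Str.findFrom text "(" (pos : Int) = ((j : Nat) : Int) := by
        rw [hjc, hA]
      have hpreLen : ((text.toList.drop pos).take (j - pos)).length = j - pos := by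
        rw [List.length_take, List.length_drop]; omega
      rw [pvLoopA]
      simp only [hfind]
      have hsj : ¬ ((j : Int) = -1) := by omega
      simp only [dif_neg hsj]
      rw [hdecomp, pvScanB_reg _ hprenotin, List.nil_append]
      simp only [pvScanB, if_true]
      rw [pvScanB_acc]
      have hflush : (if ((text.toList.drop pos).take (j - pos)).isEmpty = true then
            ([] : List (String × String))
          else [] ++ [(String.ofList ((text.toList.drop pos).take (j - pos)), "regular")])
          = (if ((j : Int) > (pos : Int)) then
            [(PySem.Str.slice text (some (pos : Int)) (some ((j : Nat) : Int)), "regular")]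
          else []) := by
        have hpreEmpty : ((text.toList.drop pos).take (j - pos)).isEmpty = true ↔ pos = j := by
          rw [List.isEmpty_iff, ← List.length_eq_zero_iff, hpreLen]
          omega
        by_cases hpp : pos < j
        · rw [if_neg (by rw [hpreEmpty]; omega), if_pos (by exact_mod_cast hpp), pvSliceBetween]
          simp
        · rw [if_pos (hpreEmpty.mpr (by omega)), if_neg (by omega)]
      rw [hflush]
      have hB : PySem.Str.findFrom text ")" ((j : Nat) : Int)
          = PySem.Chars.findFrom text.toList ")".toList ((j : Nat) : Int) none := by simp
      by_cases he : PySem.Str.findFrom text ")" ((j : Nat) : Int) = -1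
      · -- no closing paren: the tail is one regular segment
        rw [dif_pos he]
        have hnone := (PySem.Chars.findFrom_natCast_eq_neg_one_iff text.toList ")".toList j
          (le_of_lt hjlt)).mp (by rw [← hB]; exact he)
        have hnot2 : ')' ∉ text.toList.drop (j + 1) := by
          intro hm
          exact hnone ((List.singleton_infix_iff _ _).mpr (by
            rw [hLj]; exact List.mem_cons_of_mem _ hm))
        conv_rhs => rw [← List.append_nil (text.toList.drop (j + 1))]
        rw [pvScanB_par _ hnot2, pvSliceFrom, hLj]
        simp [pvScanB]
      · -- closing paren at index k: italic segment, then recurse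
        rw [dif_neg he]
        have hend := PySem.Chars.findFrom_natCast_spec text.toList ")".toList j
          (le_of_lt hjlt) (by rw [← hB]; exact he)
        have h0k : (0 : Int) ≤ PySem.Chars.findFrom text.toList ")".toList ((j : Nat) : Int) none :=
          le_trans (by positivity) hend.1
        set k := (PySem.Chars.findFrom text.toList ")".toList ((j : Nat) : Int) none).toNat
          with hkdef
        have hkc : ((k : Nat) : Int) = PySem.Chars.findFrom text.toList ")".toList ((j : Nat) : Int) none :=
          Int.toNat_of_nonneg h0k
        have hfk : PySem.Str.findFrom text ")" ((j : Nat) : Int) = ((k : Nat) : Int) := by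
          rw [hkc, hB]
        simp only [hfk, Int.toNat_natCast]
        have hjk : j ≤ k := by have := hend.1; omega
        have hkpre : [')'] <+: text.toList.drop k := hend.2.1
        have hklt : k < text.toList.length := by
          obtain ⟨t, ht⟩ := hkpre
          have : 0 < (text.toList.drop k).length := by rw [← ht]; simp
          rw [List.length_drop] at this; omega
        have hkj : j < k := by
          rcases Nat.lt_or_ge j k with h | h
          · exact h
          · exfalso
            have hEq : k = j := by omega
            rw [hEq, hLj] at hkpre
            obtain ⟨t, ht⟩ := hkpre
            simp at ht
        have hLk : text.toList.drop k = ')' :: text.toList.drop (k + 1) :=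
          pvAt _ ')' k hklt hkpre
        have hipnotin : ')' ∉ (text.toList.drop (j + 1)).take (k - (j + 1)) :=
          pvWindow text.toList ')' (j + 1) k (fun i hi1 hi2 => hend.2.2 i (by omega) hi2)
        have hdecomp2 : text.toList.drop (j + 1)
            = (text.toList.drop (j + 1)).take (k - (j + 1)) ++ ')' :: text.toList.drop (k + 1) := by
          conv_lhs => rw [← List.take_append_drop (k - (j + 1)) (text.toList.drop (j + 1))]
          rw [List.drop_drop, show j + 1 + (k - (j + 1)) = k from by omega, hLk]
        rw [hdecomp2, pvScanB_par _ hipnotin]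
        simp only [pvScanB, if_true]
        rw [pvScanB_acc, ← ih (k + 1) (by omega) (by omega)]
        congr 1
        rw [show ((k : Int) + 1) = (((k + 1 : Nat)) : Int) from by push_cast; ring, pvSliceBetween]
        have hipLen : ((text.toList.drop (j + 1)).take (k - (j + 1))).length = k - (j + 1) := by
          rw [List.length_take, List.length_drop]; omega
        have htake : (text.toList.drop j).take (k + 1 - j)
            = '(' :: ((text.toList.drop (j + 1)).take (k - (j + 1)) ++ [')']) := by
          rw [hLj, hdecomp2, show k + 1 - j = (k - j) + 1 from by omega]
          simp only [List.take_succ_cons]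
          rw [List.take_append, List.take_of_length_le (by omega), hipLen,
            show k - j - (k - (j + 1)) = 1 from by omega]
          simp
          rw [List.take_append]
          simp [hipLen]
        rw [htake]
        simp

lemma pvLoop_eq_scan (text : String) (pos : Nat) (hpos : pos ≤ text.toList.length) :
    pvLoopA text pos hpos = pvScanB [] [] false (text.toList.drop pos) :=
  pvLoop_eq_scan_aux text (text.toList.length - pos) pos hpos le_rfl

theorem pv_main (text : String) (names : List String) :
    pvNameLoopA text names = split_text_for_formatting_alt text names := by
  unfold split_text_for_formatting_alt
  induction names with
  | nil =>
    rw [pvNameLoopA, pvLoop_eq_scan]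
    simp [List.find?]
  | cons name rest ihn =>
    by_cases h : PySem.Str.startswith text (name ++ "\n") = true
    · have hc : PySem.Chars.startswith text.toList (name.toList ++ ['\n']) = true := by
        simpa using h
      rw [pvNameLoopA]
      simp only [dif_pos h]
      rw [show List.find? (fun n => PySem.Str.startswith text (n ++ "\n")) (name :: rest)
          = some name from by simp [List.find?, hc]]
      simp only []
      have hsl : (PySem.Str.slice text (some ((name.toList.length : Int) + 1)) none).toList
          = text.toList.drop (name.toList.length + 1) := by
        rw [show ((name.toList.length : Int) + 1) = (((name.toList.length + 1 : Nat)) : Int)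
          from by push_cast; ring, pvSliceFrom]
        simp
      rw [pvScanB_acc, hsl, pvLoop_eq_scan]
      simp
    · have hb : PySem.Chars.startswith text.toList (name.toList ++ ['\n']) = false := by
        simpa using h
      rw [pvNameLoopA]
      simp only [dif_neg h]
      rw [show List.find? (fun n => PySem.Str.startswith text (n ++ "\n")) (name :: rest)
          = List.find? (fun n => PySem.Str.startswith text (n ++ "\n")) rest
          from by simp [List.find?, hb]]
      exact ihn

-- ===== VERDICT (by name: the statement is the Claim_ definition above) =====
theorem split_text_for_formatting_spec : Claim_equal_split_text_for_formatting := by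
  intro text names _
  unfold Spec_split_text_for_formatting split_text_for_formatting
  exact pv_main text names
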